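-- pv_equiv track=rewrite | github.com/Bereket-Ketema/contest | C_Sequence_K_Labeling.py | solve
-- ===== SOURCE A (Python) =====
-- from collections import defaultdict
--
-- def solve(n, k, sequence):
--     freq = defaultdict(int)
--
--     for x in sequence:
--         freq[x] += 1
--
--     for cnt in freq.values():
--         if cnt > k:
--             return []
--
--     indexed = []
--     for pos, val in enumerate(sequence):
--         indexed.append([val, pos])
--
--     indexed.sort()
--
--     label = 1
--     for val, pos in indexed:
--         sequence[pos] = label
--         label += 1
--         if label > k:
--             label = 1
--
--     return sequence
-- ===== SOURCE B (Python) =====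
-- def solve(n, k, sequence):
--     # Counting-sort / rank-arithmetic approach: no (value, position) pair list is
--     # ever sorted and no wrapping label counter is simulated.  Each element's rank
--     # in the (value, position) order is computed directly as
--     #   rank = (# elements with a smaller value) + (# earlier equal elements),
--     # via a prefix-sum table over the sorted distinct values plus a running
--     # per-value occurrence count, and its label is rank % k + 1, written in a
--     # single left-to-right pass.  (Mutates `sequence` in place, like the original.)
--     cnt = {}
--     for x in sequence:
--         cnt[x] = cnt.get(x, 0) + 1
--
--     if any(c > k for c in cnt.values()):
--         return []
--
--     start = {}
--     acc = 0
--     for v in sorted(cnt):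
--         start[v] = acc
--         acc += cnt[v]
--
--     seen = {}
--     for i, x in enumerate(sequence):
--         r = start[x] + seen.get(x, 0)
--         seen[x] = seen.get(x, 0) + 1
--         sequence[i] = r % k + 1
--     return sequence
-- ===== Notes on version B (the rewrite author's own statement) =====
-- stated objective: alternative
-- what changed: Instead of sorting all n (value, position) pairs and simulating a wrapping label counter over them, B computes each element's rank directly (a prefix-sum table over the sorted distinct values plus a running per-value occurrence count) and writes rank % k + 1 in a single left-to-right pass, never building or sorting a pair list.
import Mathlib
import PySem

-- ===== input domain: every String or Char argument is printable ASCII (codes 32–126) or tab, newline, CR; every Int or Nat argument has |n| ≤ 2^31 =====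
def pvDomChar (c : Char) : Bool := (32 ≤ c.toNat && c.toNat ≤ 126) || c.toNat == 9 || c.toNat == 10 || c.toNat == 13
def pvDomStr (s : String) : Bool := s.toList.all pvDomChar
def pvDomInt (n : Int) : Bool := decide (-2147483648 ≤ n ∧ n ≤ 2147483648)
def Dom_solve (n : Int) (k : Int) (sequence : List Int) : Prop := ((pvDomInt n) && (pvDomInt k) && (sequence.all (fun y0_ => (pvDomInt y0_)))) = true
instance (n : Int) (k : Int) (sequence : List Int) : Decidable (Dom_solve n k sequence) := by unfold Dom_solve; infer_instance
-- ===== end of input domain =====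

-- B replaces A's sort of all (value, position) pairs and its simulated wrapping label counter
-- by direct rank arithmetic (prefix sums over the sorted distinct values + a running per-value
-- occurrence count, label = rank % k + 1) in one left-to-right pass; return values proved equal
-- (both Pythons also mutate `sequence` in place identically on success).

-- ===== PORT A =====
def solve (n : Int) (k : Int) (sequence : List Int) : List Int :=
  let freq : PySem.Dict Int Int :=
    sequence.foldl (fun d x => d.modify x 0 (· + 1)) PySem.Dict.empty
  if freq.values.any (fun cnt => decide (k < cnt)) then []
  else
    let indexed : List (Int × Int) :=
      (PySem.List.enumerate sequence).foldl (fun acc p => acc ++ [(p.2, p.1)]) []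
    let sortedIdx := PySem.List.sorted2 indexed Prod.fst Prod.snd
    let res := sortedIdx.foldl
      (fun (st : List Int × Int) vp =>
        let seq' := PySem.List.pySetD st.1 vp.2 st.2
        let lab := st.2 + 1
        (seq', if k < lab then 1 else lab))
      (sequence, 1)
    res.1

-- ===== PORT B =====
def solve_alt (n : Int) (k : Int) (sequence : List Int) : List Int :=
  let cnt : PySem.Dict Int Int :=
    sequence.foldl (fun d x => d.insert x (d.getD x 0 + 1)) PySem.Dict.empty
  if cnt.values.any (fun c => decide (k < c)) then []
  else
    -- start[v] = acc : prefix sums of the counts over the sorted distinct values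
    let start := ((PySem.List.sorted cnt.keys (fun v => v)).foldl
      (fun (st : PySem.Dict Int Int × Int) v => (st.1.insert v st.2, st.2 + cnt.getD v 0))
      (PySem.Dict.empty, 0)).1
    -- one pass: sequence[i] = (start[x] + seen.get(x, 0)) % k + 1
    -- (Python's start[x] cannot raise here — x is always a key of cnt — so getD is exact)
    let res := (PySem.List.enumerate sequence).foldl
      (fun (st : List Int × PySem.Dict Int Int) p =>
        let r := start.getD p.2 0 + st.2.getD p.2 0
        (PySem.List.pySetD st.1 p.1 (PySem.Int.mod r k + 1),
         st.2.insert p.2 (st.2.getD p.2 0 + 1)))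
      (sequence, PySem.Dict.empty)
    res.1

-- ===== PRECONDITION & SPEC =====
def Spec_solve (n : Int) (k : Int) (sequence : List Int) (out : List Int) : Prop := out = solve_alt n k sequence
instance (n : Int) (k : Int) (sequence : List Int) (out : List Int) : Decidable (Spec_solve n k sequence out) := by unfold Spec_solve; infer_instance

-- ===== CLAIM (what is proved, stated in full; the proofs are below) =====
def Claim_equal_solve : Prop := ∀ (n : Int) (k : Int) (sequence : List Int), Dom_solve n k sequence → Spec_solve n k sequence (solve n k sequence)

-- ===== LEMMAS AND PROOFS =====


def lexBef (a b : Int × Int) : Bool :=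
  decide (a.1 < b.1) || (!decide (b.1 < a.1) && decide (a.2 < b.2))

def lexLe (a b : Int × Int) : Prop := a.1 < b.1 ∨ (a.1 = b.1 ∧ a.2 ≤ b.2)

def lexLt (a b : Int × Int) : Prop := a.1 < b.1 ∨ (a.1 = b.1 ∧ a.2 < b.2)

theorem lexBef_true {a b : Int × Int} (h : lexBef a b = true) : lexLe a b := by
  simp [lexBef] at h; unfold lexLe; omega

theorem lexBef_false {a b : Int × Int} (h : lexBef a b = false) : lexLe b a := by
  simp [lexBef] at h; unfold lexLe; omega

theorem lexLe_trans {a b c : Int × Int} (h1 : lexLe a b) (h2 : lexLe b c) : lexLe a c := by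
  unfold lexLe at *; omega

theorem insertBy_lex_pairwise (x : Int × Int) (ys : List (Int × Int))
    (h : ys.Pairwise lexLe) : (PySem.List.insertBy lexBef x ys).Pairwise lexLe := by
  induction ys with
  | nil => simp [PySem.List.insertBy]
  | cons y ys ih =>
    rw [List.pairwise_cons] at h
    obtain ⟨hy, hys⟩ := h
    by_cases hb : lexBef x y = true
    · rw [PySem.List.insertBy, if_pos hb]
      refine List.Pairwise.cons ?_ (List.Pairwise.cons hy hys)
      intro z hz
      rcases List.mem_cons.mp hz with rfl | hz
      · exact lexBef_true hb
      · exact lexLe_trans (lexBef_true hb) (hy z hz)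
    · rw [PySem.List.insertBy, if_neg hb]
      refine List.Pairwise.cons ?_ (ih hys)
      intro z hz
      rcases (PySem.List.mem_insertBy _ _ _ _).mp hz with rfl | hz
      · exact lexBef_false (Bool.eq_false_iff.mpr hb)
      · exact hy z hz

theorem sorted2_pairwise (xs : List (Int × Int)) :
    (PySem.List.sorted2 xs Prod.fst Prod.snd).Pairwise lexLe := by
  rw [show PySem.List.sorted2 xs Prod.fst Prod.snd =
      xs.foldl (fun acc x => PySem.List.insertBy lexBef x acc) [] from rfl]
  suffices h : ∀ acc : List (Int × Int), acc.Pairwise lexLe →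
      (xs.foldl (fun acc x => PySem.List.insertBy lexBef x acc) acc).Pairwise lexLe from
    h [] List.Pairwise.nil
  induction xs with
  | nil => intro acc h; simpa using h
  | cons x xs ih =>
    intro acc hacc
    exact ih _ (insertBy_lex_pairwise x acc hacc)

theorem lexBef_eq_true_iff {a b : Int × Int} : lexBef a b = true ↔ lexLt a b := by
  obtain ⟨a1, a2⟩ := a; obtain ⟨b1, b2⟩ := b
  simp [lexBef, lexLt]; omega

-- strict order on a pairwise-lexLe nodup list
theorem pairwise_lexLt_of_le_nodup {S : List (Int × Int)}
    (hle : S.Pairwise lexLe) (hnd : S.Nodup) : S.Pairwise lexLt := by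
  refine (hle.and hnd).imp ?_
  rintro a b ⟨h1, h2⟩
  rcases h1 with h | ⟨he, h⟩
  · exact Or.inl h
  · refine Or.inr ⟨he, lt_of_le_of_ne h ?_⟩
    intro h2'
    exact h2 (Prod.ext he h2')

-- index of an element of a strictly sorted list = number of elements strictly before it
theorem countP_lexBef_getElem : ∀ (S : List (Int × Int)), S.Pairwise lexLt →
    ∀ i (h : i < S.length), S.countP (fun q => lexBef q S[i]) = i := by
  intro S
  induction S with
  | nil => intro _ i h; simp at h
  | cons x T ih =>
    intro hpw i h
    rw [List.pairwise_cons] at hpw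
    obtain ⟨hx, hT⟩ := hpw
    match i with
    | 0 =>
      simp only [List.getElem_cons_zero]
      apply List.countP_eq_zero.mpr
      intro q hq
      rcases List.mem_cons.mp hq with rfl | hq
      · simp [lexBef_eq_true_iff, lexLt]
      · have := hx q hq
        simp only [lexBef_eq_true_iff, lexLt] at *
        omega
    | j + 1 =>
      have hj : j < T.length := by simpa using h
      simp only [List.getElem_cons_succ]
      rw [List.countP_cons, ih hT j hj]
      have : lexBef x T[j] = true := by
        rw [lexBef_eq_true_iff]
        exact hx _ (List.getElem_mem _)
      simp [this]


def pairsOf (s : List Int) : List (Int × Int) :=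
  (PySem.List.enumerate s).map (fun p => (p.2, p.1))

theorem pairsOf_snd_pairwise (s : List Int) :
    (pairsOf s).Pairwise (fun a b => a.2 < b.2) :=
  List.Pairwise.map _ (fun a b h => h) (PySem.List.pairwise_lt_enumerate s 0)

theorem pairsOf_nodup (s : List Int) : (pairsOf s).Nodup :=
  (pairsOf_snd_pairwise s).imp (fun h he => by rw [he] at h; omega)

theorem mem_pairsOf {s : List Int} {w : Int × Int} (h : w ∈ pairsOf s) :
    ∃ j, ∃ (hj : j < s.length), w = (s[j], (j : Int)) := by
  rw [pairsOf, List.mem_map] at h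
  obtain ⟨p, hp, rfl⟩ := h
  rw [PySem.List.mem_enumerate_iff] at hp
  obtain ⟨j, hj, rfl⟩ := hp
  exact ⟨j, hj, by simp⟩

-- disjoint-or split of countP (no library lemma found by exact?)
theorem countP_or_disjoint {α : Type} (l : List α) (f g : α → Bool)
    (h : ∀ a ∈ l, f a = true → g a = false) :
    l.countP (fun a => f a || g a) = l.countP f + l.countP g := by
  induction l with
  | nil => rfl
  | cons a l ih =>
    simp only [List.countP_cons]
    rw [ih (fun b hb => h b (List.mem_cons_of_mem _ hb))]
    by_cases hf : f a = true
    · have := h a List.mem_cons_self hf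
      simp [hf, this]; omega
    · simp only [Bool.not_eq_true] at hf
      simp [hf]; omega

theorem lexBef_split (a : Int × Int) (v j : Int) :
    lexBef a (v, j) = (decide (a.1 < v) || (decide (a.1 = v) && decide (a.2 < j))) := by
  obtain ⟨a1, a2⟩ := a
  rw [Bool.eq_iff_iff]
  simp [lexBef]
  omega

-- countP of "value = v and index < o + t" over enumerate = count of v in the first t elements
theorem countP_enumerate_prefix : ∀ (s : List Int) (o : Int) (v : Int) (t : Nat),
    (PySem.List.enumerate s o).countP (fun q => decide (q.2 = v) && decide (q.1 < o + (t : Int)))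
      = (s.take t).count v := by
  intro s
  induction s with
  | nil => intro o v t; simp [PySem.List.enumerate_nil]
  | cons x s ih =>
    intro o v t
    rw [PySem.List.enumerate_cons, List.countP_cons]
    match t with
    | 0 =>
      simp only [Nat.cast_zero, add_zero, List.take_zero, List.count_nil]
      have h1 : (PySem.List.enumerate s (o + 1)).countP
          (fun q => decide (q.2 = v) && decide (q.1 < o + (0 : Int))) = 0 := by
        apply List.countP_eq_zero.mpr
        intro q hq
        rw [PySem.List.mem_enumerate_iff] at hq
        obtain ⟨m, hm, rfl⟩ := hq
        simp; omega
      simp only [add_zero] at h1 ⊢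
      rw [h1]
      simp
    | t + 1 =>
      have h2 : o + ((t + 1 : Nat) : Int) = (o + 1) + (t : Int) := by push_cast; ring
      rw [h2, ih (o + 1) v t]
      simp only [List.take_succ_cons, List.count_cons]
      by_cases hv : x = v <;> simp [hv] <;> omega

-- A's wrapping-label fold writes label (o+i) % k + 1 at the i-th position
theorem foldA_eq (k : Int) (hk : 1 ≤ k) : ∀ (L : List (Int × Int)) (s0 : List Int) (o : Nat),
    (L.foldl (fun (st : List Int × Int) vp =>
        (PySem.List.pySetD st.1 vp.2 st.2, if k < st.2 + 1 then 1 else st.2 + 1))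
      (s0, (o : Int) % k + 1)).1
    = ((L.zipIdx o).map (fun q => (q.1.2, ((q.2 : Int) % k) + 1))).foldl
        (fun s w => PySem.List.pySetD s w.1 w.2) s0 := by
  intro L
  induction L with
  | nil => intro s0 o; rfl
  | cons vp L ih =>
    intro s0 o
    rw [List.zipIdx_cons, List.map_cons, List.foldl_cons, List.foldl_cons]
    have hmod : 0 ≤ (o : Int) % k ∧ (o : Int) % k < k :=
      ⟨Int.emod_nonneg _ (by omega), Int.emod_lt_of_pos _ (by omega)⟩
    have hsucc : ((o + 1 : Nat) : Int) % k = ((o : Int) % k + 1) % k := by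
      have h0 : ((o + 1 : Nat) : Int) = ((o : Int) % k + 1) + k * ((o : Int) / k) := by
        have := Int.ediv_add_emod (o : Int) k
        push_cast
        omega
      rw [h0, Int.add_mul_emod_self_left]
    have hnext : (if k < (o : Int) % k + 1 + 1 then (1 : Int) else (o : Int) % k + 1 + 1)
        = ((o + 1 : Nat) : Int) % k + 1 := by
      rw [hsucc]
      by_cases h : (o : Int) % k + 1 = k
      · rw [if_pos (by omega), h, Int.emod_self]
        norm_num
      · rw [if_neg (by omega),
          show ((o : Int) % k + 1) % k = (o : Int) % k + 1 from
            Int.emod_eq_of_lt (by omega) (by omega)]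
    rw [hnext]
    exact ih (PySem.List.pySetD s0 vp.2 ((o : Int) % k + 1)) (o + 1)

-- B's single pass as an explicit write list
def writesB (k : Int) (start : PySem.Dict Int Int) :
    PySem.Dict Int Int → List Int → Int → List (Int × Int)
  | _, [], _ => []
  | seen, x :: t, o =>
    (o, PySem.Int.mod (start.getD x 0 + seen.getD x 0) k + 1) ::
      writesB k start (seen.insert x (seen.getD x 0 + 1)) t (o + 1)

theorem foldB_eq (k : Int) (start : PySem.Dict Int Int) :
    ∀ (t : List Int) (o : Int) (s0 : List Int) (seen : PySem.Dict Int Int),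
    ((PySem.List.enumerate t o).foldl (fun (st : List Int × PySem.Dict Int Int) p =>
        (PySem.List.pySetD st.1 p.1 (PySem.Int.mod (start.getD p.2 0 + st.2.getD p.2 0) k + 1),
         st.2.insert p.2 (st.2.getD p.2 0 + 1))) (s0, seen)).1
    = (writesB k start seen t o).foldl (fun s w => PySem.List.pySetD s w.1 w.2) s0 := by
  intro t
  induction t with
  | nil => intro o s0 seen; rfl
  | cons x t ih =>
    intro o s0 seen
    rw [PySem.List.enumerate_cons, List.foldl_cons, writesB, List.foldl_cons]
    exact ih (o + 1) _ _

theorem writesB_map_fst (k : Int) (start : PySem.Dict Int Int) :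
    ∀ (t : List Int) (seen : PySem.Dict Int Int) (o : Int),
    (writesB k start seen t o).map Prod.fst = PySem.List.pyRange o (o + t.length) 1 := by
  intro t
  induction t with
  | nil => intro seen o; simp [writesB, PySem.List.pyRange]
  | cons x t ih =>
    intro seen o
    have h1 : o + ((x :: t).length : Int) = (o + 1) + (t.length : Int) := by
      push_cast [List.length_cons]; ring
    rw [writesB, List.map_cons, ih]
    conv_rhs => rw [h1, PySem.List.pyRange_one_cons (show o < o + 1 + ((t.length : Nat) : Int) from by omega)]

theorem writesB_mem (k : Int) (start : PySem.Dict Int Int) :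
    ∀ (t pre : List Int) (seen : PySem.Dict Int Int),
    (∀ x, seen.getD x 0 = ((pre.count x : Nat) : Int)) →
    ∀ w ∈ writesB k start seen t ((pre.length : Nat) : Int),
    ∃ j, pre.length ≤ j ∧ j < pre.length + t.length ∧
      w = ((j : Int), PySem.Int.mod
        (start.getD ((pre ++ t).getD j 0) 0 + (((pre ++ t).take j).count ((pre ++ t).getD j 0) : Int))
        k + 1) := by
  intro t
  induction t with
  | nil => intro pre seen _ w hw; simp [writesB] at hw
  | cons x t ih =>
    intro pre seen hseen w hw
    rw [writesB] at hw
    rcases List.mem_cons.mp hw with rfl | hw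
    · refine ⟨pre.length, le_refl _, by simp, ?_⟩
      have hget : (pre ++ x :: t).getD pre.length 0 = x := by
        rw [List.getD, List.getElem?_append_right (le_refl _)]
        simp
      have htake : (pre ++ x :: t).take pre.length = pre := by simp
      rw [hget, htake, hseen x]
    · have hinv : ∀ y, (seen.insert x (seen.getD x 0 + 1)).getD y 0
          = (((pre ++ [x]).count y : Nat) : Int) := by
        intro y
        rw [PySem.Dict.getD_insert, List.count_append]
        by_cases hxy : y = x
        · subst hxy; rw [if_pos rfl, hseen y]; simp
        · rw [if_neg hxy, hseen y]
          simp [List.count_singleton]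
          omega
      have hlen : ((pre.length : Nat) : Int) + 1 = (((pre ++ [x]).length : Nat) : Int) := by
        simp
      rw [hlen] at hw
      obtain ⟨j, hj1, hj2, hj3⟩ := ih (pre ++ [x]) _ hinv w hw
      refine ⟨j, by simp at hj1; omega, by simp at hj2 ⊢; omega, ?_⟩
      rw [hj3]
      congr 2 <;> rw [List.append_assoc, List.singleton_append]

-- the target label function: rank % k + 1, rank computed from the input list
def labelF (s : List Int) (k : Int) (p : Int) : Int :=
  PySem.Int.mod ((s.countP (fun y => decide (y < s.getD p.toNat 0)) : Int)
    + (((s.take p.toNat).count (s.getD p.toNat 0) : Nat) : Int)) k + 1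

-- a fold of inserts whose keys all differ from x leaves getD x unchanged
theorem startFold_skip (c : Int → Int) (x : Int) : ∀ (K : List Int)
    (d0 : PySem.Dict Int Int) (a0 : Int), (∀ v ∈ K, v ≠ x) →
    ((K.foldl (fun (st : PySem.Dict Int Int × Int) v => (st.1.insert v st.2, st.2 + c v))
      (d0, a0)).1).getD x 0 = d0.getD x 0 := by
  intro K
  induction K with
  | nil => intro d0 a0 _; rfl
  | cons v K ih =>
    intro d0 a0 h
    rw [List.foldl_cons, ih _ _ (fun w hw => h w (List.mem_cons_of_mem _ hw)),
      PySem.Dict.getD_insert, if_neg]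
    intro he
    exact h v List.mem_cons_self he.symm

theorem startFold_getD (c : Int → Int) : ∀ (K : List Int)
    (d0 : PySem.Dict Int Int) (a0 : Int), K.Pairwise (· < ·) → ∀ x ∈ K,
    ((K.foldl (fun (st : PySem.Dict Int Int × Int) v => (st.1.insert v st.2, st.2 + c v))
      (d0, a0)).1).getD x 0
      = a0 + ((K.filter (fun v => decide (v < x))).map c).sum := by
  intro K
  induction K with
  | nil => intro _ _ _ x hx; simp at hx
  | cons v K ih =>
    intro d0 a0 hpw x hx
    rw [List.pairwise_cons] at hpw
    obtain ⟨hv, hK⟩ := hpw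
    rw [List.foldl_cons]
    rcases List.mem_cons.mp hx with rfl | hx
    · rw [startFold_skip _ _ _ _ _ (fun w hw he => by have := hv w hw; omega)]
      rw [PySem.Dict.getD_insert, if_pos rfl]
      have hnil : (x :: K).filter (fun w => decide (w < x)) = [] := by
        rw [List.filter_eq_nil_iff]
        intro w hw
        rcases List.mem_cons.mp hw with rfl | hw
        · simp
        · have := hv w hw
          simp
          omega
      rw [hnil]
      simp
    · rw [ih _ _ hK x hx]
      have hvx : v < x := hv x hx
      rw [List.filter_cons, if_pos (by simpa using hvx), List.map_cons, List.sum_cons]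
      ring

-- sum of the counts of the distinct values below x = number of elements below x
theorem sum_counts_lt (s : List Int) (x : Int) :
    ((((PySem.List.sorted (PySem.Set.ofList s) (fun v => v)).filter
        (fun v => decide (v < x))).map (fun v => ((s.count v : Nat) : Int))).sum)
      = ((s.countP (fun y => decide (y < x)) : Nat) : Int) := by
  have hperm : (PySem.List.sorted (PySem.Set.ofList s) (fun v => v)).Perm s.dedup := by
    refine (PySem.List.sorted_perm _ _ _).trans ?_
    rw [List.perm_ext_iff_of_nodup (PySem.Set.nodup_ofList s) s.nodup_dedup]
    intro a
    rw [PySem.Set.mem_ofList, List.mem_dedup]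
  have h2 := ((hperm.filter (fun v => decide (v < x))).map
    (fun v => ((s.count v : Nat) : Int))).sum_eq
  rw [h2]
  have h3 : (List.map (fun v => ((s.count v : Nat) : Int))
      (s.dedup.filter (fun v => decide (v < x))))
      = List.map (Nat.cast : Nat → Int) (List.map (fun v => s.count v)
        (s.dedup.filter (fun v => decide (v < x)))) := by
    rw [List.map_map]; rfl
  rw [h3, ← Nat.cast_list_sum, ← List.sum_map_count_dedup_filter_eq_countP (fun y => decide (y < x)) s]

-- writing a list of (position, value) pairs whose values are a function of the position
theorem foldl_writes_eq (W : List (Int × Int)) (Ffun : Int → Int)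
    (h : ∀ w ∈ W, w.2 = Ffun w.1) (s0 : List Int) :
    W.foldl (fun s w => PySem.List.pySetD s w.1 w.2) s0
      = (W.map Prod.fst).foldl (fun s p => PySem.List.pySetD s p (Ffun p)) s0 := by
  rw [List.foldl_map]
  apply PySem.List.foldl_congr_mem
  intro acc x hx
  rw [h x hx]

-- A's sorted-order labels: the i-th pair of the sorted list gets exactly label rank % k + 1
theorem graphA (s : List Int) (k : Int) (hk : 1 ≤ k) :
    ∀ w ∈ (((PySem.List.sorted2 (pairsOf s) Prod.fst Prod.snd).zipIdx 0).map
        (fun q => (q.1.2, ((q.2 : Int) % k) + 1))),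
      w.2 = labelF s k w.1 := by
  intro w hw
  obtain ⟨q, hq, rfl⟩ := List.mem_map.mp hw
  obtain ⟨pair, i⟩ := q
  have hmz := List.mem_zipIdx hq
  obtain ⟨-, hi, hpair⟩ := hmz
  simp only [Nat.zero_add, Nat.sub_zero] at hi hpair
  have hSperm : (PySem.List.sorted2 (pairsOf s) Prod.fst Prod.snd).Perm (pairsOf s) :=
    PySem.List.sorted2_perm _ _ _ _
  have hi' : i < (PySem.List.sorted2 (pairsOf s) Prod.fst Prod.snd).length := by
    omega
  have hmemP : (PySem.List.sorted2 (pairsOf s) Prod.fst Prod.snd)[i] ∈ pairsOf s :=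
    hSperm.mem_iff.mp (List.getElem_mem hi')
  obtain ⟨j, hj, hEq⟩ := mem_pairsOf hmemP
  have hnd : (PySem.List.sorted2 (pairsOf s) Prod.fst Prod.snd).Nodup :=
    hSperm.nodup_iff.mpr (pairsOf_nodup s)
  have hcount := countP_lexBef_getElem _
    (pairwise_lexLt_of_le_nodup (sorted2_pairwise (pairsOf s)) hnd) i hi'
  rw [hSperm.countP_eq, hEq] at hcount
  have hcount2 : (pairsOf s).countP
      (fun a => decide (a.1 < s[j]) || (decide (a.1 = s[j]) && decide (a.2 < (j : Int)))) = i := by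
    rw [← hcount]
    apply List.countP_congr
    intro a _
    rw [lexBef_split a s[j] (j : Int)]
  rw [countP_or_disjoint _ _ _ (by intro a _ h1; simp at h1 ⊢; omega)] at hcount2
  -- first summand: elements with a smaller value
  have hc1 : ∀ v : Int, (pairsOf s).countP (fun a => decide (a.1 < v))
      = s.countP (fun y => decide (y < v)) := by
    intro v
    rw [pairsOf, List.countP_map]
    conv_rhs => rw [← PySem.List.map_snd_enumerate s 0, List.countP_map]
    rfl
  -- second summand: equal values at earlier positions
  have hc2 : ∀ v : Int, (pairsOf s).countP (fun a => decide (a.1 = v) && decide (a.2 < (j : Int)))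
      = (s.take j).count v := by
    intro v
    rw [pairsOf, List.countP_map]
    have := countP_enumerate_prefix s 0 v j
    rw [show (0 : Int) + (j : Int) = (j : Int) by ring] at this
    exact this
  rw [hc1 s[j], hc2 s[j]] at hcount2
  -- now identify the label
  have hgd : s.getD j 0 = s[j] := by
    simp [List.getD_eq_getElem?_getD, List.getElem?_eq_getElem hj]
  show ((i : Int)) % k + 1 = labelF s k pair.2
  rw [show pair.2 = ((j : Nat) : Int) from by rw [hpair, hEq]]
  simp only [labelF, Int.toNat_natCast, hgd]
  have hiv : ((i : Nat) : Int)
      = ((s.countP (fun y => decide (y < s[j])) : Nat) : Int)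
        + (((s.take j).count s[j] : Nat) : Int) := by
    omega
  rw [PySem.Int.mod_eq_emod_of_pos (by omega), hiv]

theorem labelF_natCast (s : List Int) (k : Int) (j : Nat) (hj : j < s.length) :
    labelF s k (j : Int) = PySem.Int.mod
      (((s.countP (fun y => decide (y < s[j])) : Nat) : Int)
        + (((s.take j).count s[j] : Nat) : Int)) k + 1 := by
  have hsx : s.getD j 0 = s[j] := by
    simp [List.getD_eq_getElem?_getD, List.getElem?_eq_getElem hj]
  simp only [labelF, Int.toNat_natCast, hsx]

-- B's prefix-sum table: start[x] = number of elements smaller than x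
theorem start_getD (s : List Int) (x : Int) (hx : x ∈ s) :
    (((PySem.List.sorted (PySem.Dict.counter s).keys (fun v => v)).foldl
        (fun (st : PySem.Dict Int Int × Int) v =>
          (st.1.insert v st.2, st.2 + (PySem.Dict.counter s).getD v 0))
        (PySem.Dict.empty, 0)).1).getD x 0
      = ((s.countP (fun y => decide (y < x)) : Nat) : Int) := by
  rw [PySem.Dict.keys_counter]
  have hpw := PySem.List.sorted_ofList_pairwise_lt s
  have hxK : x ∈ PySem.List.sorted (PySem.Set.ofList s) (fun v => v) := by
    rw [PySem.List.mem_sorted, PySem.Set.mem_ofList]; exact hx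
  rw [startFold_getD _ _ _ _ hpw x hxK]
  rw [List.map_congr_left (fun v _ => PySem.Dict.getD_counter s v)]
  rw [sum_counts_lt]
  ring

theorem solve_eq_alt (n : Int) (k : Int) (sequence : List Int) :
    solve n k sequence = solve_alt n k sequence := by
  rcases eq_or_ne sequence [] with rfl | hne
  · rfl
  · simp only [solve, solve_alt]
    rw [← PySem.Dict.counter_eq_foldl, PySem.Dict.foldl_insert_getD_add_one_eq_counter]
    by_cases hg : (PySem.Dict.counter sequence).values.any (fun c => decide (k < c)) = true
    · rw [if_pos hg, if_pos hg]
    · rw [if_neg hg, if_neg hg]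
      rw [Bool.not_eq_true, List.any_eq_false] at hg
      have hk : 1 ≤ k := by
        obtain ⟨a, t, he⟩ := List.exists_cons_of_ne_nil hne
        have hmem : (PySem.Dict.counter sequence).getD a 0
            ∈ (PySem.Dict.counter sequence).values := by
          rw [PySem.Dict.values_eq_map_keys _ (PySem.Dict.nodup_keys_counter sequence) 0]
          exact List.mem_map_of_mem (by
            rw [PySem.Dict.keys_counter, PySem.Set.mem_ofList, he]
            exact List.mem_cons_self)
        have hc := hg _ hmem
        rw [PySem.Dict.getD_counter] at hc
        have hpos : 0 < sequence.count a :=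
          List.count_pos_iff.mpr (by rw [he]; exact List.mem_cons_self)
        simp only [decide_eq_true_eq] at hc
        omega
      -- ===== A side: sorted pairs + wrapping counter = write list WA =====
      rw [PySem.List.foldl_append_singleton_eq_map, List.nil_append]
      rw [show List.map (fun p : Int × Int => (p.2, p.1)) (PySem.List.enumerate sequence)
          = pairsOf sequence from rfl]
      rw [show (sequence, (1 : Int)) = (sequence, ((0 : Nat) : Int) % k + 1) from by norm_num]
      rw [foldA_eq k hk]
      rw [foldl_writes_eq _ (labelF sequence k) (graphA sequence k hk)]
      -- ===== B side: single pass = write list WB =====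
      rw [foldB_eq]
      have hinv : ∀ x : Int, (PySem.Dict.empty : PySem.Dict Int Int).getD x 0
          = ((([] : List Int).count x : Nat) : Int) := by
        intro x; simp
      have hwm := writesB_mem k
        (((PySem.List.sorted (PySem.Dict.counter sequence).keys (fun v => v)).foldl
          (fun (st : PySem.Dict Int Int × Int) v =>
            (st.1.insert v st.2, st.2 + (PySem.Dict.counter sequence).getD v 0))
          (PySem.Dict.empty, 0)).1)
        sequence [] PySem.Dict.empty hinv
      simp only [List.length_nil, Nat.cast_zero, List.nil_append, Nat.zero_add] at hwm
      have hB : ∀ w ∈ writesB k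
          (((PySem.List.sorted (PySem.Dict.counter sequence).keys (fun v => v)).foldl
            (fun (st : PySem.Dict Int Int × Int) v =>
              (st.1.insert v st.2, st.2 + (PySem.Dict.counter sequence).getD v 0))
            (PySem.Dict.empty, 0)).1)
          PySem.Dict.empty sequence 0, w.2 = labelF sequence k w.1 := by
        intro w hw
        obtain ⟨j, _, hj2, hw⟩ := hwm w hw
        have hjlen : j < sequence.length := by omega
        have hsx : sequence.getD j 0 = sequence[j] := by
          simp [List.getD_eq_getElem?_getD, List.getElem?_eq_getElem hjlen]
        rw [hw]
        dsimp only
        rw [hsx, start_getD sequence sequence[j] (List.getElem_mem hjlen),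
          labelF_natCast sequence k j hjlen]
      rw [foldl_writes_eq _ (labelF sequence k) hB]
      rw [writesB_map_fst]
      -- ===== positions: a permutation of range(len) on both sides =====
      have hfstA : (((PySem.List.sorted2 (pairsOf sequence) Prod.fst Prod.snd).zipIdx 0).map
          (fun q => (q.1.2, ((q.2 : Int) % k) + 1))).map Prod.fst
          = (PySem.List.sorted2 (pairsOf sequence) Prod.fst Prod.snd).map Prod.snd := by
        rw [List.map_map]
        rw [show (Prod.fst ∘ fun q : (Int × Int) × Nat => (q.1.2, ((q.2 : Int) % k) + 1))
            = Prod.snd ∘ (Prod.fst : (Int × Int) × Nat → Int × Int) from rfl]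
        rw [← List.map_map, List.zipIdx_map_fst]
      rw [hfstA]
      have hperm : ((PySem.List.sorted2 (pairsOf sequence) Prod.fst Prod.snd).map Prod.snd).Perm
          (PySem.List.pyRange 0 (0 + (sequence.length : Int)) 1) := by
        refine ((PySem.List.sorted2_perm (pairsOf sequence) Prod.fst Prod.snd false).map
          Prod.snd).trans ?_
        rw [show (pairsOf sequence).map Prod.snd
            = (PySem.List.enumerate sequence).map (fun p => p.1) from by
          rw [pairsOf, List.map_map]; rfl]
        rw [PySem.List.map_fst_enumerate]
      refine List.Perm.foldl_eq' hperm ?_ sequence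
      intro x hx y hy z
      by_cases hxy : x = y
      · rw [hxy]
      · have hx0 : 0 ≤ x := by
          have := hperm.mem_iff.mp hx
          rw [PySem.List.mem_pyRange_one] at this
          omega
        have hy0 : 0 ≤ y := by
          have := hperm.mem_iff.mp hy
          rw [PySem.List.mem_pyRange_one] at this
          omega
        rw [PySem.List.pySetD_of_nonneg _ _ hx0, PySem.List.pySetD_of_nonneg _ _ hy0,
          PySem.List.pySetD_of_nonneg _ _ hy0, PySem.List.pySetD_of_nonneg _ _ hx0]
        exact List.set_comm _ _ (by omega)


-- ===== VERDICT (by name: the statement is the Claim_ definition above) =====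
theorem solve_spec : Claim_equal_solve := by
  intro n k sequence _
  exact solve_eq_alt n k sequence
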